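-- pv_equiv track=rewrite | github.com/joechanx/python-file-automation-demo | src/url_loader.py | normalize_urls
-- ===== SOURCE A (Python) =====
-- def normalize_urls(urls: list[str]) -> list[str]:
--     normalized: list[str] = []
--     seen: set[str] = set()
--     for url in urls:
--         value = str(url).strip()
--         if not value:
--             continue
--         if not value.startswith(("http://", "https://")):
--             value = f"https://{value}"
--         if value not in seen:
--             seen.add(value)
--             normalized.append(value)
--     return normalized
-- ===== SOURCE B (Python) =====
-- def _dedup(xs):
--     # divide and conquer: dedup each half, then merge, keeping from the right
--     # half only what the left half does not already contain
--     if len(xs) <= 1: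
--         return list(xs)
--     mid = len(xs) // 2
--     left = _dedup(xs[:mid])
--     right = _dedup(xs[mid:])
--     lset = set(left)
--     return left + [x for x in right if x not in lset]
--
--
-- def normalize_urls(urls: list[str]) -> list[str]:
--     cleaned = []
--     for url in urls:
--         value = str(url).strip()
--         if not value:
--             continue
--         if not value.startswith(("http://", "https://")):
--             value = "https://" + value
--         cleaned.append(value)
--     return _dedup(cleaned)
-- ===== Notes on version B (the rewrite author's own statement) =====
-- stated objective: alternative
-- what changed: Replaces A's single fused pass with an inline seen-set by a pure normalization pass followed by an order-preserving divide-and-conquer deduplication: dedup each half recursively, then append the right half filtered against the left.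
import Mathlib
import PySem

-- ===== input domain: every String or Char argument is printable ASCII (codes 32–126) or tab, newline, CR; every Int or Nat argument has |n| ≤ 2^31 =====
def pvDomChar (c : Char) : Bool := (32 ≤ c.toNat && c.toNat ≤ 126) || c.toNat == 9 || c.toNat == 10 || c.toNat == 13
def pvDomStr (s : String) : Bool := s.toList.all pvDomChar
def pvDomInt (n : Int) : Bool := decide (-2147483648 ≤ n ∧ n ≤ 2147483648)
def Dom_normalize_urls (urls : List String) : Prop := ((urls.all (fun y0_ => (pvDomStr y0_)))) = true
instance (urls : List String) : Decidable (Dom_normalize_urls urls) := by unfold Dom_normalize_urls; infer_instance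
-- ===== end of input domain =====

-- B replaces A's fused pass with an inline seen-set by a pure normalization pass followed by
-- an order-preserving divide-and-conquer deduplication (alternative decomposition).


-- ===== PORT A =====
-- one iteration of A's loop over state (normalized, seen)
def normalizeStepA (st : List String × PySem.Set String) (url : String) :
    List String × PySem.Set String :=
  let value := PySem.Str.strip url
  if value = "" then st
  else
    let value :=
      if !(PySem.Str.startswith value "http://" || PySem.Str.startswith value "https://")
      then "https://" ++ value else value
    if PySem.Set.contains st.2 value then st
    else (st.1 ++ [value], PySem.Set.add st.2 value)

def normalize_urls (urls : List String) : List String :=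
  (urls.foldl normalizeStepA ([], PySem.Set.empty)).1

-- ===== PORT B =====
-- length bound used by dedupDC's termination argument (Python: mid = len(xs) // 2)
theorem floordiv_two_nat (n : Nat) : PySem.Int.floordiv (n : Int) 2 = ((n / 2 : Nat) : Int) := by
  exact_mod_cast PySem.Int.floordiv_natCast n 2

-- B's normalization pass: one loop iteration appending the cleaned value
def cleanStepB (acc : List String) (url : String) : List String :=
  let value := PySem.Str.strip url
  if value = "" then acc
  else
    let value :=
      if !(PySem.Str.startswith value "http://" || PySem.Str.startswith value "https://")
      then "https://" ++ value else value
    acc ++ [value]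

-- B's _dedup: dedup each half recursively, then append the right half filtered
-- against set(left)
def dedupDC (xs : List String) : List String :=
  if xs.length ≤ 1 then xs
  else
    let mid : Int := PySem.Int.floordiv (xs.length : Int) 2
    let left := dedupDC (PySem.List.slice xs none (some mid))
    let right := dedupDC (PySem.List.slice xs (some mid) none)
    left ++ right.filter (fun x => !(PySem.Set.contains (PySem.Set.ofList left) x))
termination_by xs.length
decreasing_by
  · rw [floordiv_two_nat, PySem.List.slice_to_natCast]
    simp only [List.length_take]
    omega
  · rw [floordiv_two_nat, PySem.List.slice_from_natCast]
    simp only [List.length_drop]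
    omega

def normalize_urls_alt (urls : List String) : List String :=
  dedupDC (urls.foldl cleanStepB [])

-- ===== PRECONDITION & SPEC =====
def Spec_normalize_urls (urls : List String) (out : List String) : Prop := out = normalize_urls_alt urls
instance (urls : List String) (out : List String) : Decidable (Spec_normalize_urls urls out) := by unfold Spec_normalize_urls; infer_instance

-- ===== CLAIM (what is proved, stated in full; the proofs are below) =====
def Claim_equal_normalize_urls : Prop := ∀ (urls : List String), Dom_normalize_urls urls → Spec_normalize_urls urls (normalize_urls urls)

-- ===== LEMMAS AND PROOFS =====
-- proof-side helper: the normalization both loops perform, as an Option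
def normalizeOne (url : String) : Option String :=
  let value := PySem.Str.strip url
  if value = "" then none
  else if PySem.Str.startswith value "http://" || PySem.Str.startswith value "https://"
  then some value
  else some ("https://" ++ value)

-- proof-side helper: right-to-left nub (what B's loop computes on the cleaned list)
def nubr (l : List String) : List String :=
  l.foldr (fun v r => v :: r.filter (fun u => u != v)) []

-- nubr on a cons, by definition
theorem nubr_cons (a : String) (l : List String) :
    nubr (a :: l) = a :: (nubr l).filter (fun u => u != a) := rfl

-- A's step on a duplicated state (s, s) is normalizeOne followed by Set.add.
theorem normalizeStepA_dup (s : PySem.Set String) (url : String) :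
    normalizeStepA (s, s) url =
      match normalizeOne url with
      | none => (s, s)
      | some v => (PySem.Set.add s v, PySem.Set.add s v) := by
  unfold normalizeStepA normalizeOne PySem.Set.add
  by_cases h0 : PySem.Str.strip url = ""
  · simp [h0]
  · by_cases h1 : (PySem.Str.startswith (PySem.Str.strip url) "http://" ||
        PySem.Str.startswith (PySem.Str.strip url) "https://") = true
    · simp only [h0, h1, Bool.not_true]
      by_cases h2 : PySem.Str.strip url ∈ s <;> simp [PySem.Set.contains, h2]
    · simp only [Bool.not_eq_true] at h1
      simp only [h0, h1, Bool.not_false]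
      by_cases h2 : "https://" ++ PySem.Str.strip url ∈ s <;>
        simp [PySem.Set.contains, h2]

-- A's whole loop, started on a duplicated state, is foldl Set.add over the cleaned list.
theorem foldA_eq (urls : List String) (s : PySem.Set String) :
    urls.foldl normalizeStepA (s, s) =
      (((urls.map normalizeOne).filterMap id).foldl PySem.Set.add s,
       ((urls.map normalizeOne).filterMap id).foldl PySem.Set.add s) := by
  induction urls generalizing s with
  | nil => rfl
  | cons u rest ih =>
    simp only [List.foldl_cons, List.map_cons, normalizeStepA_dup]
    cases h : normalizeOne u with
    | none => simp [ih]
    | some v => simp [ih]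

-- B's cleaning step is normalizeOne followed by an append.
theorem cleanStepB_eq (acc : List String) (url : String) :
    cleanStepB acc url = acc ++ (normalizeOne url).toList := by
  unfold cleanStepB normalizeOne
  by_cases h0 : PySem.Str.strip url = ""
  · simp [h0]
  · by_cases h1 : (PySem.Str.startswith (PySem.Str.strip url) "http://" ||
        PySem.Str.startswith (PySem.Str.strip url) "https://") = true
    · simp only [h1, Bool.not_true]
      simp [h0]
    · simp only [Bool.not_eq_true] at h1
      simp only [h1, Bool.not_false]
      simp [h0]

-- B's normalization pass produces the cleaned list.
theorem foldClean_eq (urls : List String) (acc : List String) :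
    urls.foldl cleanStepB acc = acc ++ (urls.map normalizeOne).filterMap id := by
  induction urls generalizing acc with
  | nil => simp
  | cons u rest ih =>
    simp only [List.foldl_cons, List.map_cons, List.filterMap_cons, cleanStepB_eq, ih]
    cases normalizeOne u <;> simp

-- the bridge: foldl Set.add from state s appends the fresh part of nubr l
theorem foldl_add_eq_nubr (l : List String) (s : List String) :
    l.foldl PySem.Set.add s = s ++ (nubr l).filter (fun x => decide (x ∉ s)) := by
  induction l generalizing s with
  | nil => simp [nubr]
  | cons a l ih =>
    simp only [List.foldl_cons]
    by_cases ha : a ∈ s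
    · rw [show PySem.Set.add s a = s from by simp [PySem.Set.add, ha], ih, nubr_cons]
      rw [List.filter_cons_of_neg (by simp [ha]), List.filter_filter]
      congr 1
      apply List.filter_congr
      intro x _
      by_cases hx : x = a <;> simp [hx, ha]
    · rw [show PySem.Set.add s a = s ++ [a] from by simp [PySem.Set.add, ha], ih, nubr_cons]
      rw [List.filter_cons_of_pos (by simp [ha]), List.filter_filter, List.append_assoc]
      simp only [List.singleton_append]
      congr 2
      apply List.filter_congr
      intro x _
      by_cases hx : x = a <;> simp [hx, ha]

-- foldl Set.add from the empty state is nubr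
theorem foldl_add_nil (l : List String) : l.foldl PySem.Set.add [] = nubr l := by
  rw [foldl_add_eq_nubr]
  simp

-- nubr of an append: left part, then the fresh part of the right
theorem nubr_append (t d : List String) :
    nubr (t ++ d) = nubr t ++ (nubr d).filter (fun x => decide (x ∉ nubr t)) := by
  rw [← foldl_add_nil (t ++ d), List.foldl_append, foldl_add_nil t, foldl_add_eq_nubr]

-- B's divide-and-conquer dedup computes nubr
theorem dedupDC_eq_nubr (xs : List String) : dedupDC xs = nubr xs := by
  induction xs using dedupDC.induct with
  | case1 xs h =>
    rw [dedupDC]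
    match xs, h with
    | [], _ => rfl
    | [a], _ => rfl
  | case2 xs h mid ih1 ih2 =>
    rw [dedupDC, if_neg h]
    simp only [floordiv_two_nat, PySem.List.slice_to_natCast,
      PySem.List.slice_from_natCast]
    have hmid : mid = ((xs.length / 2 : Nat) : Int) := floordiv_two_nat xs.length
    rw [hmid, PySem.List.slice_to_natCast] at ih1
    rw [hmid, PySem.List.slice_from_natCast] at ih2
    rw [ih1, ih2]
    have hfun : (fun x => !(PySem.Set.contains
          (PySem.Set.ofList (nubr (xs.take (xs.length / 2)))) x)) =
        (fun x => decide (x ∉ nubr (xs.take (xs.length / 2)))) := by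
      funext x
      simp [PySem.Set.contains, PySem.Set.mem_ofList]
    rw [hfun, ← nubr_append, List.take_append_drop]

-- ===== VERDICT (by name: the statement is the Claim_ definition above) =====
theorem normalize_urls_spec : Claim_equal_normalize_urls := by
  intro urls _
  show normalize_urls urls = normalize_urls_alt urls
  unfold normalize_urls normalize_urls_alt
  rw [show (PySem.Set.empty : PySem.Set String) = ([] : List String) from rfl]
  rw [foldA_eq, foldClean_eq, dedupDC_eq_nubr, foldl_add_nil]
  simp
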